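-- pv_equiv track=rewrite | github.com/Dair133/similarityWebsite | backend/testing/testModelOne.py | get_shared_count
-- ===== SOURCE A (Python) =====
-- def get_shared_count(list1, list2):
--     # Handle empty, None, or non-string inputs
--     if not list1 or not list2 or not isinstance(list1, str) or not isinstance(list2, str):
--         return 0
--
--     # Split strings and clean items
--     try:
--         set1 = set(x.strip() for x in list1.split(';'))
--         set2 = set(x.strip() for x in list2.split(';'))
--         # Remove empty strings
--         set1 = {x for x in set1 if x}
--         set2 = {x for x in set2 if x}
--         return len(set1.intersection(set2))
--     except:
--         return 0
-- ===== SOURCE B (Python) =====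
-- def get_shared_count(list1, list2):
--     # Handle empty, None, or non-string inputs
--     if not list1 or not list2 or not isinstance(list1, str) or not isinstance(list2, str):
--         return 0
--     try:
--         # Sort-then-merge instead of set intersection: each side becomes a
--         # strictly increasing (duplicate-free) sorted token list, and a
--         # two-pointer merge counts the common values.
--         a = _distinct_sorted(list1)
--         b = _distinct_sorted(list2)
--         count = 0
--         i = j = 0
--         while i < len(a) and j < len(b):
--             if a[i] < b[j]:
--                 i += 1
--             elif b[j] < a[i]:
--                 j += 1
--             else:
--                 count += 1
--                 i += 1
--                 j += 1
--         return count
--     except: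
--         return 0
--
--
-- def _distinct_sorted(s):
--     toks = sorted(t for t in (x.strip() for x in s.split(';')) if t)
--     out = []
--     for t in toks:
--         if not out or out[-1] != t:
--             out.append(t)
--     return out
-- ===== Notes on version B (the rewrite author's own statement) =====
-- stated objective: alternative
-- what changed: Replaces hashing (two sets plus set.intersection) with a sort-based algorithm: each string's cleaned tokens are sorted and adjacent-deduplicated, then a two-pointer merge over the two ordered lists counts the common values.
import Mathlib
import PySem

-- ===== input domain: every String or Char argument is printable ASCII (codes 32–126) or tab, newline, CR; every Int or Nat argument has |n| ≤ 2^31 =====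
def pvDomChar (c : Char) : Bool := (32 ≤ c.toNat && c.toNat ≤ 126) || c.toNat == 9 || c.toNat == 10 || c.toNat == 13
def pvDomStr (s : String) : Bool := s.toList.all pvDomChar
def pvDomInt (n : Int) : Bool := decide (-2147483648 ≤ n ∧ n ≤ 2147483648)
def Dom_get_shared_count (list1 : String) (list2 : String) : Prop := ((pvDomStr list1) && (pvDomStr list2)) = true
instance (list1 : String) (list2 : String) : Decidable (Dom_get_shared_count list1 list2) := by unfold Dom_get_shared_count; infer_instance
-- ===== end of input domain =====

-- B replaces A's hashing (two sets + set.intersection) by sorting: each side's cleaned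
-- tokens are sorted and adjacent-deduplicated, then a two-pointer merge counts the
-- common values; same result, a genuinely different (comparison-based) algorithm.

-- ===== PORT A =====
-- x.split(';') with the literal non-empty separator never raises: split? always returns
-- some here, transliterated as .getD [].
def get_shared_count (list1 : String) (list2 : String) : Int :=
  if list1 = "" ∨ list2 = "" then 0
  else
    let set1 := PySem.Set.ofList (((PySem.Str.split? list1 ";").getD []).map PySem.Str.strip)
    let set2 := PySem.Set.ofList (((PySem.Str.split? list2 ";").getD []).map PySem.Str.strip)
    let set1f : PySem.Set String := List.filter (fun x => x != "") set1
    let set2f : PySem.Set String := List.filter (fun x => x != "") set2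
    PySem.Set.len (PySem.Set.inter set1f set2f)

-- ===== PORT B =====
-- the append-loop of Source B's _distinct_sorted (keep t unless it equals out[-1])
def pvCompress (toks : List String) : List String :=
  toks.foldl (fun out t => if out = [] ∨ out.getLast? ≠ some t then out ++ [t] else out) []

def pvDistinctSorted (s : String) : List String :=
  pvCompress (PySem.List.sorted
    ((((PySem.Str.split? s ";").getD []).map PySem.Str.strip).filter (fun t => t != ""))
    (fun x => x) false)

-- the two-pointer while loop of Source B, as recursion on the two suffixes a[i:], b[j:]
def pvMergeCount : List String → List String → Int
  | [], _ => 0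
  | _ :: _, [] => 0
  | x :: xs, y :: ys =>
    if x < y then pvMergeCount xs (y :: ys)
    else if y < x then pvMergeCount (x :: xs) ys
    else 1 + pvMergeCount xs ys
termination_by a b => a.length + b.length
decreasing_by all_goals simp; try omega

def get_shared_count_alt (list1 : String) (list2 : String) : Int :=
  if list1 = "" ∨ list2 = "" then 0
  else pvMergeCount (pvDistinctSorted list1) (pvDistinctSorted list2)

-- ===== PRECONDITION & SPEC =====
def Spec_get_shared_count (list1 : String) (list2 : String) (out : Int) : Prop := out = get_shared_count_alt list1 list2
instance (list1 : String) (list2 : String) (out : Int) : Decidable (Spec_get_shared_count list1 list2 out) := by unfold Spec_get_shared_count; infer_instance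

-- ===== CLAIM (what is proved, stated in full; the proofs are below) =====
def Claim_equal_get_shared_count : Prop := ∀ (list1 : String) (list2 : String), Dom_get_shared_count list1 list2 → Spec_get_shared_count list1 list2 (get_shared_count list1 list2)

-- ===== LEMMAS AND PROOFS =====

-- in a strictly increasing list the last element is the maximum
lemma le_getLast_of_pairwise_lt : ∀ (acc : List String), acc.Pairwise (· < ·) →
    ∀ a ∈ acc, ∀ l, acc.getLast? = some l → a ≤ l := by
  intro acc
  induction acc with
  | nil => simp
  | cons b rest ih =>
    intro hp a ha l hl
    cases rest with
    | nil =>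
      simp at hl ha
      simp [ha, hl]
    | cons c rs =>
      rw [List.getLast?_cons_cons] at hl
      have hlm : l ∈ c :: rs := List.mem_of_getLast? hl
      rcases List.mem_cons.1 ha with he | hm
      · subst he
        exact le_of_lt ((List.pairwise_cons.1 hp).1 l hlm)
      · exact ih (List.pairwise_cons.1 hp).2 a hm l hl

-- the compress loop of Source B: invariant-carrying characterisation of the foldl
lemma pvCompress_go : ∀ (toks acc : List String),
    toks.Pairwise (· ≤ ·) → acc.Pairwise (· < ·) →
    (∀ a ∈ acc, ∀ t ∈ toks, a ≤ t) →
    (toks.foldl (fun out t => if out = [] ∨ out.getLast? ≠ some t then out ++ [t] else out) acc).Pairwise (· < ·)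
    ∧ (∀ x, x ∈ toks.foldl (fun out t => if out = [] ∨ out.getLast? ≠ some t then out ++ [t] else out) acc ↔ x ∈ acc ∨ x ∈ toks) := by
  intro toks
  induction toks with
  | nil => intro acc _ hacc _; exact ⟨hacc, by simp⟩
  | cons t rest ih =>
    intro acc htoks hacc hle
    have htr : rest.Pairwise (· ≤ ·) := (List.pairwise_cons.1 htoks).2
    have htrest : ∀ u ∈ rest, t ≤ u := (List.pairwise_cons.1 htoks).1
    simp only [List.foldl_cons]
    by_cases hc : acc = [] ∨ acc.getLast? ≠ some t
    · rw [if_pos hc]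
      have hlt : ∀ a ∈ acc, a < t := by
        intro a ha
        rcases hc with hnil | hne
        · subst hnil; simp at ha
        · obtain ⟨l, hl⟩ : ∃ l, acc.getLast? = some l := by
            cases hacc' : acc.getLast? with
            | none => exact absurd (List.getLast?_eq_none_iff.1 hacc' ▸ ha) (by simp_all [List.getLast?_eq_none_iff.1 hacc'])
            | some l => exact ⟨l, rfl⟩
          have hal : a ≤ l := le_getLast_of_pairwise_lt acc hacc a ha l hl
          have hlt2 : l ≤ t := hle l (List.mem_of_getLast? hl) t (List.mem_cons_self)
          have : l ≠ t := fun e => hne (e ▸ hl)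
          exact lt_of_le_of_lt hal (lt_of_le_of_ne hlt2 this)
      have hacc' : (acc ++ [t]).Pairwise (· < ·) := by
        rw [List.pairwise_append]
        exact ⟨hacc, by simp, by simpa using hlt⟩
      have hle' : ∀ a ∈ acc ++ [t], ∀ u ∈ rest, a ≤ u := by
        intro a ha u hu
        rcases List.mem_append.1 ha with h1 | h2
        · exact hle a h1 u (List.mem_cons_of_mem _ hu)
        · simp at h2; subst h2; exact htrest u hu
      obtain ⟨h1, h2⟩ := ih (acc ++ [t]) htr hacc' hle'
      refine ⟨h1, fun x => ?_⟩
      rw [h2 x]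
      simp [List.mem_append, List.mem_cons]
      tauto
    · rw [if_neg hc]
      push_neg at hc
      have htm : t ∈ acc := by
        have := List.mem_of_getLast? hc.2
        exact this
      obtain ⟨h1, h2⟩ := ih acc htr hacc
        (fun a ha u hu => hle a ha u (List.mem_cons_of_mem _ hu))
      refine ⟨h1, fun x => ?_⟩
      rw [h2 x]
      simp only [List.mem_cons]
      constructor
      · tauto
      · rintro (h | rfl | h) <;> tauto

lemma pvCompress_pairwise (toks : List String) (h : toks.Pairwise (· ≤ ·)) :
    (pvCompress toks).Pairwise (· < ·) :=
  (pvCompress_go toks [] h (by simp) (by simp)).1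

lemma pvCompress_mem (toks : List String) (h : toks.Pairwise (· ≤ ·)) (x : String) :
    x ∈ pvCompress toks ↔ x ∈ toks := by
  rw [pvCompress, (pvCompress_go toks [] h (by simp) (by simp)).2 x]
  simp

-- the two-pointer merge on strictly increasing lists counts the common values
lemma pvMergeCount_eq : ∀ (a b : List String), a.Pairwise (· < ·) → b.Pairwise (· < ·) →
    pvMergeCount a b = ((a.filter (fun e => decide (e ∈ b))).length : Int) := by
  intro a b
  fun_induction pvMergeCount a b with
  | case1 b => intro _ _; simp [List.filter]
  | case2 x xs => intro _ _; simp
  | case3 x xs y ys hxy ih =>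
    intro ha hb
    have hxnot : x ∉ y :: ys := by
      intro hx
      rcases List.mem_cons.1 hx with he | hm
      · exact absurd he (ne_of_lt hxy)
      · exact absurd ((List.pairwise_cons.1 hb).1 x hm) (not_lt.2 (le_of_lt hxy)).elim
    rw [ih (List.pairwise_cons.1 ha).2 hb]
    rw [List.filter_cons_of_neg (by simpa using hxnot)]
  | case4 x xs y ys hxy hyx ih =>
    intro ha hb
    have hcongr : (x :: xs).filter (fun e => decide (e ∈ y :: ys)) =
        (x :: xs).filter (fun e => decide (e ∈ ys)) := by
      apply List.filter_congr
      intro e he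
      have hye : y < e := by
        rcases List.mem_cons.1 he with rfl | hm
        · exact hyx
        · exact lt_trans hyx ((List.pairwise_cons.1 ha).1 e hm)
      have : e ≠ y := (ne_of_gt hye)
      simp [this]
    rw [ih ha (List.pairwise_cons.1 hb).2, hcongr]
  | case5 x xs y ys hxy hyx ih =>
    intro ha hb
    have hxy' : x = y := le_antisymm (not_lt.1 hyx) (not_lt.1 hxy)
    subst hxy'
    have hcongr : xs.filter (fun e => decide (e ∈ x :: ys)) =
        xs.filter (fun e => decide (e ∈ ys)) := by
      apply List.filter_congr
      intro e he
      have : e ≠ x := ne_of_gt ((List.pairwise_cons.1 ha).1 e he)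
      simp [this]
    rw [ih (List.pairwise_cons.1 ha).2 (List.pairwise_cons.1 hb).2]
    rw [List.filter_cons_of_pos (by simp), List.length_cons, ← hcongr]
    push_cast
    ring

-- the non-guard bodies of the two ports agree, for any token lists
lemma pv_core (l1 l2 : List String) :
    PySem.Set.len (PySem.Set.inter
      (List.filter (fun x => x != "") (PySem.Set.ofList (l1.map PySem.Str.strip)))
      (List.filter (fun x => x != "") (PySem.Set.ofList (l2.map PySem.Str.strip)))) =
    pvMergeCount (pvCompress (PySem.List.sorted ((l1.map PySem.Str.strip).filter (fun t => t != "")) (fun x => x) false))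
                 (pvCompress (PySem.List.sorted ((l2.map PySem.Str.strip).filter (fun t => t != "")) (fun x => x) false)) := by
  set d1 := pvCompress (PySem.List.sorted ((l1.map PySem.Str.strip).filter (fun t => t != "")) (fun x => x) false) with hd1
  set d2 := pvCompress (PySem.List.sorted ((l2.map PySem.Str.strip).filter (fun t => t != "")) (fun x => x) false) with hd2
  have hp1 : d1.Pairwise (· < ·) := pvCompress_pairwise _ (PySem.List.sorted_pairwise _ _)
  have hp2 : d2.Pairwise (· < ·) := pvCompress_pairwise _ (PySem.List.sorted_pairwise _ _)
  have hm1 : ∀ x, x ∈ d1 ↔ x ≠ "" ∧ x ∈ l1.map PySem.Str.strip := by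
    intro x
    rw [hd1, pvCompress_mem _ (PySem.List.sorted_pairwise _ _), PySem.List.mem_sorted,
      List.mem_filter]
    simp [and_comm]
  have hm2 : ∀ x, x ∈ d2 ↔ x ≠ "" ∧ x ∈ l2.map PySem.Str.strip := by
    intro x
    rw [hd2, pvCompress_mem _ (PySem.List.sorted_pairwise _ _), PySem.List.mem_sorted,
      List.mem_filter]
    simp [and_comm]
  rw [pvMergeCount_eq d1 d2 hp1 hp2]
  simp only [PySem.Set.len, PySem.Set.inter]
  congr 1
  apply List.Perm.length_eq
  rw [List.perm_ext_iff_of_nodup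
    (((PySem.Set.nodup_ofList _).filter _).filter _)
    (List.Nodup.filter _ (hp1.imp (fun h => ne_of_lt h)))]
  intro a
  simp only [List.mem_filter, PySem.Set.mem_ofList, PySem.Set.contains_eq_listContains,
    List.contains_iff_mem, bne_iff_ne, ne_eq, decide_eq_true_eq, hm1, hm2]
  tauto

-- ===== VERDICT (by name: the statement is the Claim_ definition above) =====
theorem get_shared_count_spec : Claim_equal_get_shared_count := by
  unfold Claim_equal_get_shared_count Spec_get_shared_count
  intro list1 list2 _
  unfold get_shared_count get_shared_count_alt
  by_cases hguard : list1 = "" ∨ list2 = ""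
  · rw [if_pos hguard, if_pos hguard]
  · rw [if_neg hguard, if_neg hguard]
    exact pv_core ((PySem.Str.split? list1 ";").getD []) ((PySem.Str.split? list2 ";").getD [])
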